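-- pv_equiv track=rewrite | github.com/MBenincasa/advent-of-code-2022 | day12/part2/hill-climbing-algorithm.py | construct_graph
-- ===== SOURCE A (Python) =====
-- def get_elevation(elevation: str) -> int:
--     if elevation == "S":
--         return get_elevation("a")
--     elif elevation == "E":
--         return get_elevation("z")
--     return ord(elevation) - ord("a")
--
-- def construct_graph(lines: list[str]) -> dict[tuple[int, int], set[tuple[int, int]]]:
--     graph = {}
--     for y, line in enumerate(lines):
--         for x, char in enumerate(line):
--             coord = (x, y)
--             children = set()
--             candidates = [
--                 (x + dx, y + dy)
--                 for dx, dy in [(-1, 0), (1, 0), (0, -1), (0, 1)]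
--                 if 0 <= x + dx < len(line) and 0 <= y + dy < len(lines)
--             ]
--             for x1, y1 in candidates:
--                 if get_elevation(lines[y1][x1]) - get_elevation(char) <= 1:
--                     children.add((x1, y1))
--             graph[coord] = children
--     return graph
-- ===== SOURCE B (Python) =====
-- def get_elevation(elevation: str) -> int:
--     if elevation == "S":
--         return get_elevation("a")
--     elif elevation == "E":
--         return get_elevation("z")
--     return ord(elevation) - ord("a")
--
-- def construct_graph(lines: list[str]) -> dict[tuple[int, int], set[tuple[int, int]]]:
--     # Edge-centric: compute each adjacent pair's elevation difference ONCE and record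
--     # both directed edges, then assemble every cell's children from the four edge sets.
--     elev = [[get_elevation(c) for c in line] for line in lines]
--     h = len(elev)
--     can_left, can_right, can_up, can_down = set(), set(), set(), set()
--     for y, row in enumerate(elev):
--         for x in range(len(row) - 1):
--             d = row[x + 1] - row[x]
--             if d <= 1:
--                 can_right.add((x, y))
--             if -d <= 1:
--                 can_left.add((x + 1, y))
--     for y in range(h - 1):
--         for x in range(min(len(elev[y]), len(elev[y + 1]))):
--             d = elev[y + 1][x] - elev[y][x]
--             if d <= 1:
--                 can_down.add((x, y))
--             if -d <= 1:
--                 can_up.add((x, y + 1))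
--     graph = {}
--     for y in range(h):
--         for x in range(len(elev[y])):
--             children = set()
--             if (x, y) in can_left:
--                 children.add((x - 1, y))
--             if (x, y) in can_right:
--                 children.add((x + 1, y))
--             if (x, y) in can_up:
--                 children.add((x, y - 1))
--             if (x, y) in can_down:
--                 children.add((x, y + 1))
--             graph[(x, y)] = children
--     return graph
-- ===== Notes on version B (the rewrite author's own statement) =====
-- stated objective: alternative
-- what changed: B is edge-centric: it precomputes the elevation grid, then scans each adjacent pair (right/down) exactly once recording both directed edges into four 'can move' sets, and finally assembles every cell's children by membership in those sets, instead of A's vertex-centric loop that re-scans all four neighbours and recomputes get_elevation per access.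
import Mathlib
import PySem

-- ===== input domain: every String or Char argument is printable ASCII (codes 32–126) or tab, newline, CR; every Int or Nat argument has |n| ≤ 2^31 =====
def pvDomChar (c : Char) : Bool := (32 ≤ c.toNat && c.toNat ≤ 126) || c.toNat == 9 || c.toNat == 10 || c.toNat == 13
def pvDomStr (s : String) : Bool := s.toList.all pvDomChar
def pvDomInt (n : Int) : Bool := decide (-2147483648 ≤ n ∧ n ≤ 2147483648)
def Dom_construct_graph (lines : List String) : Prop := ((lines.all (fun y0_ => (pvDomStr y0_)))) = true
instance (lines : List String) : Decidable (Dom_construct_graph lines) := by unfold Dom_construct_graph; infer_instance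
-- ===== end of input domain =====

-- B is edge-centric: it precomputes the elevation grid, scans each adjacent pair (right/down)
-- exactly once recording both directed edges into four 'can move' sets, and assembles every
-- cell's children from those sets — instead of A's per-cell scan of all four neighbours.

-- ===== PORT A =====
-- get_elevation: the recursive calls get_elevation("a") / get_elevation("z") hit the base case
-- immediately; they are unfolded here (shared by both ports, as in Source A / Source B).
def getElevation (c : Char) : Int :=
  if c = 'S' then (('a'.toNat : Int) - ('a'.toNat : Int))
  else if c = 'E' then (('z'.toNat : Int) - ('a'.toNat : Int))
  else ((c.toNat : Int) - ('a'.toNat : Int))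

def dirsA : List (Int × Int) := [(-1, 0), (1, 0), (0, -1), (0, 1)]

-- lines[y1][x1]; total via defaults — inside Pre_ every evaluated access is in range (exact there)
def charAtA (lines : List String) (y1 x1 : Int) : Char :=
  PySem.List.pyGetD (PySem.List.pyGetD lines y1 "").toList x1 ' '

def childrenA (lines : List String) (line : List Char) (x y : Int) (c : Char) :
    PySem.Set (Int × Int) :=
  let candidates : List (Int × Int) :=
    (dirsA.filter (fun d =>
        decide (0 ≤ x + d.1 ∧ x + d.1 < (line.length : Int) ∧
                0 ≤ y + d.2 ∧ y + d.2 < (lines.length : Int)))).map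
      (fun d => (x + d.1, y + d.2))
  candidates.foldl
    (fun s p =>
      if getElevation (charAtA lines p.2 p.1) - getElevation c ≤ 1 then PySem.Set.add s p else s)
    PySem.Set.empty

def construct_graph (lines : List String) : List (Int × Int × List (Int × Int)) :=
  ((PySem.List.enumerate lines).foldl (fun g yl =>
      (PySem.List.enumerate yl.2.toList).foldl (fun g xc =>
        g.insert (xc.1, yl.1) (childrenA lines yl.2.toList xc.1 yl.1 xc.2)) g)
    PySem.Dict.empty).items.map (fun p => (p.1.1, p.1.2, p.2))

-- ===== PORT B =====
-- horizontal pass over each row: each adjacent pair once; returns (can_right, can_left)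
def hPassB (elev : List (List Int)) : PySem.Set (Int × Int) × PySem.Set (Int × Int) :=
  (PySem.List.enumerate elev).foldl (fun rl yr =>
    (PySem.List.pyRange 0 ((yr.2.length : Int) - 1) 1).foldl (fun rl x =>
      let d := PySem.List.pyGetD yr.2 (x + 1) 0 - PySem.List.pyGetD yr.2 x 0
      (if d ≤ 1 then PySem.Set.add rl.1 (x, yr.1) else rl.1,
       if -d ≤ 1 then PySem.Set.add rl.2 (x + 1, yr.1) else rl.2)) rl)
    (PySem.Set.empty, PySem.Set.empty)

-- vertical pass over consecutive row pairs: each adjacent pair once; returns (can_down, can_up)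
def vPassB (elev : List (List Int)) : PySem.Set (Int × Int) × PySem.Set (Int × Int) :=
  (PySem.List.pyRange 0 ((elev.length : Int) - 1) 1).foldl (fun du y =>
    (PySem.List.pyRange 0
        (min ((PySem.List.pyGetD elev y []).length : Int)
             ((PySem.List.pyGetD elev (y + 1) []).length : Int)) 1).foldl (fun du x =>
      let d := PySem.List.pyGetD (PySem.List.pyGetD elev (y + 1) []) x 0
               - PySem.List.pyGetD (PySem.List.pyGetD elev y []) x 0
      (if d ≤ 1 then PySem.Set.add du.1 (x, y) else du.1,
       if -d ≤ 1 then PySem.Set.add du.2 (x, y + 1) else du.2)) du)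
    (PySem.Set.empty, PySem.Set.empty)

-- assemble one cell's children from the four membership sets (B's if-chain, in order L,R,U,D)
def cellB (canL canR canU canD : PySem.Set (Int × Int)) (x y : Int) : PySem.Set (Int × Int) :=
  let c0 : PySem.Set (Int × Int) := PySem.Set.empty
  let c1 := if PySem.Set.contains canL (x, y) then PySem.Set.add c0 (x - 1, y) else c0
  let c2 := if PySem.Set.contains canR (x, y) then PySem.Set.add c1 (x + 1, y) else c1
  let c3 := if PySem.Set.contains canU (x, y) then PySem.Set.add c2 (x, y - 1) else c2
  if PySem.Set.contains canD (x, y) then PySem.Set.add c3 (x, y + 1) else c3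

def construct_graph_alt (lines : List String) : List (Int × Int × List (Int × Int)) :=
  let elev := lines.map (fun l => l.toList.map getElevation)
  let h : Int := (elev.length : Int)
  let rl := hPassB elev
  let du := vPassB elev
  (((PySem.List.pyRange 0 h 1).foldl (fun g y =>
      (PySem.List.pyRange 0 ((PySem.List.pyGetD elev y []).length : Int) 1).foldl (fun g x =>
        g.insert (x, y) (cellB rl.2 rl.1 du.2 du.1 x y)) g) PySem.Dict.empty)).items.map
    (fun p => (p.1.1, p.1.2, p.2))

-- ===== PRECONDITION & SPEC =====
-- Pre_ excludes exactly the ragged inputs (two adjacent lines of different lengths), on which the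
-- Python A raises IndexError: it bounds x by the current row's length but indexes the adjacent row.
def Pre_construct_graph (lines : List String) : Prop :=
  List.IsChain (fun a b => a.toList.length = b.toList.length) lines
instance (lines : List String) : Decidable (Pre_construct_graph lines) := by
  unfold Pre_construct_graph; infer_instance

def pvWitness_construct_graph : List String := ["Sa", "bE"]

def Spec_construct_graph (lines : List String) (out : List (Int × Int × List (Int × Int))) : Prop :=
  out = construct_graph_alt lines
instance (lines : List String) (out : List (Int × Int × List (Int × Int))) :
    Decidable (Spec_construct_graph lines out) := by unfold Spec_construct_graph; infer_instance

-- ===== CLAIM (what is proved, stated in full; the proofs are below) =====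
def Claim_equal_construct_graph : Prop := ∀ (lines : List String), Dom_construct_graph lines →
  Pre_construct_graph lines → Spec_construct_graph lines (construct_graph lines)

-- ===== LEMMAS AND PROOFS =====

-- elevation of elev[b][a] (total via defaults; exact where used, under Pre_)
def elevAtB (elev : List (List Int)) (b a : Int) : Int :=
  PySem.List.pyGetD (PySem.List.pyGetD elev b []) a 0

lemma pv_mem_foldl_pair {alpha : Type} (xs : List alpha)
    (F : PySem.Set (Int × Int) × PySem.Set (Int × Int) → alpha →
         PySem.Set (Int × Int) × PySem.Set (Int × Int))
    (P Q : alpha → (Int × Int) → Prop) (z : Int × Int)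
    (hF : ∀ s a, (z ∈ (F s a).1 ↔ z ∈ s.1 ∨ P a z) ∧ (z ∈ (F s a).2 ↔ z ∈ s.2 ∨ Q a z))
    (s : PySem.Set (Int × Int) × PySem.Set (Int × Int)) :
    (z ∈ (xs.foldl F s).1 ↔ z ∈ s.1 ∨ ∃ a ∈ xs, P a z) ∧
    (z ∈ (xs.foldl F s).2 ↔ z ∈ s.2 ∨ ∃ a ∈ xs, Q a z) := by
  induction xs generalizing s with
  | nil => simp
  | cons a t ih =>
    simp only [List.foldl_cons]
    obtain ⟨h1, h2⟩ := ih (F s a)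
    constructor
    · rw [h1, (hF s a).1]; simp only [List.mem_cons]
      constructor
      · rintro ((hs | hp) | ⟨b, hb, hpb⟩)
        · exact Or.inl hs
        · exact Or.inr ⟨a, Or.inl rfl, hp⟩
        · exact Or.inr ⟨b, Or.inr hb, hpb⟩
      · rintro (hs | ⟨b, (rfl | hb), hpb⟩)
        · exact Or.inl (Or.inl hs)
        · exact Or.inl (Or.inr hpb)
        · exact Or.inr ⟨b, hb, hpb⟩
    · rw [h2, (hF s a).2]; simp only [List.mem_cons]
      constructor
      · rintro ((hs | hp) | ⟨b, hb, hpb⟩)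
        · exact Or.inl hs
        · exact Or.inr ⟨a, Or.inl rfl, hp⟩
        · exact Or.inr ⟨b, Or.inr hb, hpb⟩
      · rintro (hs | ⟨b, (rfl | hb), hpb⟩)
        · exact Or.inl (Or.inl hs)
        · exact Or.inl (Or.inr hpb)
        · exact Or.inr ⟨b, hb, hpb⟩

lemma pv_mem_pair_step (s : PySem.Set (Int × Int) × PySem.Set (Int × Int)) (d : Int)
    (c1 c2 : Int × Int) (z : Int × Int) :
    (z ∈ ((if d ≤ 1 then PySem.Set.add s.1 c1 else s.1,
           if -d ≤ 1 then PySem.Set.add s.2 c2 else s.2) :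
           PySem.Set (Int × Int) × PySem.Set (Int × Int)).1 ↔
       z ∈ s.1 ∨ (d ≤ 1 ∧ z = c1)) ∧
    (z ∈ ((if d ≤ 1 then PySem.Set.add s.1 c1 else s.1,
           if -d ≤ 1 then PySem.Set.add s.2 c2 else s.2) :
           PySem.Set (Int × Int) × PySem.Set (Int × Int)).2 ↔
       z ∈ s.2 ∨ (-d ≤ 1 ∧ z = c2)) := by
  constructor
  · dsimp only; split_ifs with h <;> simp [PySem.Set.mem_add, h]
  · dsimp only; split_ifs with h <;> simp [PySem.Set.mem_add, h]

lemma pv_hPass_mem (elev : List (List Int)) (z : Int × Int) :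
    (z ∈ (hPassB elev).1 ↔ ∃ yr ∈ PySem.List.enumerate elev,
       ∃ x ∈ PySem.List.pyRange 0 ((yr.2.length : Int) - 1) 1,
         PySem.List.pyGetD yr.2 (x + 1) 0 - PySem.List.pyGetD yr.2 x 0 ≤ 1 ∧ z = (x, yr.1)) ∧
    (z ∈ (hPassB elev).2 ↔ ∃ yr ∈ PySem.List.enumerate elev,
       ∃ x ∈ PySem.List.pyRange 0 ((yr.2.length : Int) - 1) 1,
         -(PySem.List.pyGetD yr.2 (x + 1) 0 - PySem.List.pyGetD yr.2 x 0) ≤ 1 ∧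
         z = (x + 1, yr.1)) := by
  unfold hPassB
  have h := pv_mem_foldl_pair (PySem.List.enumerate elev) _
    (fun yr z => ∃ x ∈ PySem.List.pyRange 0 ((yr.2.length : Int) - 1) 1,
        PySem.List.pyGetD yr.2 (x + 1) 0 - PySem.List.pyGetD yr.2 x 0 ≤ 1 ∧ z = (x, yr.1))
    (fun yr z => ∃ x ∈ PySem.List.pyRange 0 ((yr.2.length : Int) - 1) 1,
        -(PySem.List.pyGetD yr.2 (x + 1) 0 - PySem.List.pyGetD yr.2 x 0) ≤ 1 ∧
        z = (x + 1, yr.1)) z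
    (fun s yr => pv_mem_foldl_pair (PySem.List.pyRange 0 ((yr.2.length : Int) - 1) 1) _
      (fun x z => PySem.List.pyGetD yr.2 (x + 1) 0 - PySem.List.pyGetD yr.2 x 0 ≤ 1 ∧
        z = (x, yr.1))
      (fun x z => -(PySem.List.pyGetD yr.2 (x + 1) 0 - PySem.List.pyGetD yr.2 x 0) ≤ 1 ∧
        z = (x + 1, yr.1)) z
      (fun s' x => pv_mem_pair_step s'
        (PySem.List.pyGetD yr.2 (x + 1) 0 - PySem.List.pyGetD yr.2 x 0) (x, yr.1) (x + 1, yr.1) z)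
      s)
    (PySem.Set.empty, PySem.Set.empty)
  simpa [PySem.Set.empty] using h

lemma pv_vPass_mem (elev : List (List Int)) (z : Int × Int) :
    (z ∈ (vPassB elev).1 ↔ ∃ y ∈ PySem.List.pyRange 0 ((elev.length : Int) - 1) 1,
       ∃ x ∈ PySem.List.pyRange 0
           (min ((PySem.List.pyGetD elev y []).length : Int)
                ((PySem.List.pyGetD elev (y + 1) []).length : Int)) 1,
         elevAtB elev (y + 1) x - elevAtB elev y x ≤ 1 ∧ z = (x, y)) ∧
    (z ∈ (vPassB elev).2 ↔ ∃ y ∈ PySem.List.pyRange 0 ((elev.length : Int) - 1) 1,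
       ∃ x ∈ PySem.List.pyRange 0
           (min ((PySem.List.pyGetD elev y []).length : Int)
                ((PySem.List.pyGetD elev (y + 1) []).length : Int)) 1,
         -(elevAtB elev (y + 1) x - elevAtB elev y x) ≤ 1 ∧ z = (x, y + 1)) := by
  unfold vPassB
  have h := pv_mem_foldl_pair (PySem.List.pyRange 0 ((elev.length : Int) - 1) 1) _
    (fun y z => ∃ x ∈ PySem.List.pyRange 0
        (min ((PySem.List.pyGetD elev y []).length : Int)
             ((PySem.List.pyGetD elev (y + 1) []).length : Int)) 1,
        elevAtB elev (y + 1) x - elevAtB elev y x ≤ 1 ∧ z = (x, y))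
    (fun y z => ∃ x ∈ PySem.List.pyRange 0
        (min ((PySem.List.pyGetD elev y []).length : Int)
             ((PySem.List.pyGetD elev (y + 1) []).length : Int)) 1,
        -(elevAtB elev (y + 1) x - elevAtB elev y x) ≤ 1 ∧ z = (x, y + 1)) z
    (fun s y => pv_mem_foldl_pair (PySem.List.pyRange 0
        (min ((PySem.List.pyGetD elev y []).length : Int)
             ((PySem.List.pyGetD elev (y + 1) []).length : Int)) 1) _
      (fun x z => elevAtB elev (y + 1) x - elevAtB elev y x ≤ 1 ∧ z = (x, y))
      (fun x z => -(elevAtB elev (y + 1) x - elevAtB elev y x) ≤ 1 ∧ z = (x, y + 1)) z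
      (fun s' x => pv_mem_pair_step s' (elevAtB elev (y + 1) x - elevAtB elev y x)
        (x, y) (x, y + 1) z)
      s)
    (PySem.Set.empty, PySem.Set.empty)
  simpa [PySem.Set.empty] using h

lemma pv_if_if {alpha : Type} (a b : Prop) [Decidable a] [Decidable b] (u v : alpha) :
    (if a then (if b then u else v) else v) = if a ∧ b then u else v := by
  by_cases ha : a <;> by_cases hb : b <;> simp [ha, hb]

lemma pv_step_add (b : Prop) [Decidable b] (s : PySem.Set (Int × Int)) (c : Int × Int)
    (h : c ∉ s) :
    (if b then PySem.Set.add s c else s) = s ++ (if b then [c] else []) := by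
  by_cases hb : b <;> simp [hb, PySem.Set.add_of_not_mem h]

lemma pv_not_mem_ite (c c' : Int × Int) (b : Prop) [Decidable b] (h : c ≠ c') :
    c ∉ (if b then [c'] else []) := by
  by_cases hb : b <;> simp [hb, h]

lemma pv_peel (x y : Int) (p1 p2 p3 p4 : Prop)
    [Decidable p1] [Decidable p2] [Decidable p3] [Decidable p4] :
    (if p4 then PySem.Set.add
        (if p3 then PySem.Set.add
            (if p2 then PySem.Set.add
                (if p1 then PySem.Set.add PySem.Set.empty (x - 1, y) else PySem.Set.empty)
                (x + 1, y)
              else (if p1 then PySem.Set.add PySem.Set.empty (x - 1, y) else PySem.Set.empty))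
            (x, y - 1)
          else (if p2 then PySem.Set.add
                (if p1 then PySem.Set.add PySem.Set.empty (x - 1, y) else PySem.Set.empty)
                (x + 1, y)
              else (if p1 then PySem.Set.add PySem.Set.empty (x - 1, y) else PySem.Set.empty)))
        (x, y + 1)
      else (if p3 then PySem.Set.add
            (if p2 then PySem.Set.add
                (if p1 then PySem.Set.add PySem.Set.empty (x - 1, y) else PySem.Set.empty)
                (x + 1, y)
              else (if p1 then PySem.Set.add PySem.Set.empty (x - 1, y) else PySem.Set.empty))
            (x, y - 1)
          else (if p2 then PySem.Set.add
                (if p1 then PySem.Set.add PySem.Set.empty (x - 1, y) else PySem.Set.empty)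
                (x + 1, y)
              else (if p1 then PySem.Set.add PySem.Set.empty (x - 1, y) else PySem.Set.empty))))
    = (if p1 then [(x - 1, y)] else []) ++ (if p2 then [(x + 1, y)] else []) ++
      (if p3 then [(x, y - 1)] else []) ++ (if p4 then [(x, y + 1)] else []) := by
  have m1 : ((x - 1, y) : Int × Int) ∉ (PySem.Set.empty : PySem.Set (Int × Int)) := by
    simp [PySem.Set.empty]
  rw [pv_step_add p1 _ _ m1]
  have m2 : ((x + 1, y) : Int × Int) ∉
      ((PySem.Set.empty : PySem.Set (Int × Int)) ++ (if p1 then [(x - 1, y)] else [])) := by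
    intro hmem
    rcases List.mem_append.mp hmem with hmm | hmm
    · simp [PySem.Set.empty] at hmm
    · exact pv_not_mem_ite _ _ _ (by simp only [ne_eq, Prod.mk.injEq]; omega) hmm
  rw [pv_step_add p2 _ _ m2]
  have m3 : ((x, y - 1) : Int × Int) ∉
      (((PySem.Set.empty : PySem.Set (Int × Int)) ++ (if p1 then [(x - 1, y)] else [])) ++
        (if p2 then [(x + 1, y)] else [])) := by
    intro hmem
    rcases List.mem_append.mp hmem with hmm | hmm
    · rcases List.mem_append.mp hmm with hmm2 | hmm2
      · simp [PySem.Set.empty] at hmm2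
      · exact pv_not_mem_ite _ _ _ (by simp only [ne_eq, Prod.mk.injEq]; omega) hmm2
    · exact pv_not_mem_ite _ _ _ (by simp only [ne_eq, Prod.mk.injEq]; omega) hmm
  rw [pv_step_add p3 _ _ m3]
  have m4 : ((x, y + 1) : Int × Int) ∉
      ((((PySem.Set.empty : PySem.Set (Int × Int)) ++ (if p1 then [(x - 1, y)] else [])) ++
        (if p2 then [(x + 1, y)] else [])) ++ (if p3 then [(x, y - 1)] else [])) := by
    intro hmem
    rcases List.mem_append.mp hmem with hmm | hmm
    · rcases List.mem_append.mp hmm with hmm2 | hmm2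
      · rcases List.mem_append.mp hmm2 with hmm3 | hmm3
        · simp [PySem.Set.empty] at hmm3
        · exact pv_not_mem_ite _ _ _ (by simp only [ne_eq, Prod.mk.injEq]; omega) hmm3
      · exact pv_not_mem_ite _ _ _ (by simp only [ne_eq, Prod.mk.injEq]; omega) hmm2
    · exact pv_not_mem_ite _ _ _ (by simp only [ne_eq, Prod.mk.injEq]; omega) hmm
  rw [pv_step_add p4 _ _ m4]
  simp [PySem.Set.empty, List.append_assoc]

lemma pv_foldl_flatMap {alpha beta gamma : Type} (l : List alpha) (f : alpha → List beta)
    (g : gamma → beta → gamma) (init : gamma) :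
    (l.flatMap f).foldl g init = l.foldl (fun a x => (f x).foldl g a) init := by
  induction l generalizing init with
  | nil => rfl
  | cons a l ih => simp [List.flatMap_cons, List.foldl_append, ih]

lemma pv_flatMap_congr {alpha beta : Type} (l : List alpha) (f g : alpha → List beta)
    (h : ∀ a ∈ l, f a = g a) : l.flatMap f = l.flatMap g := by
  induction l with
  | nil => rfl
  | cons a t ih =>
    simp only [List.flatMap_cons, h a List.mem_cons_self,
      ih (fun b hb => h b (List.mem_cons_of_mem _ hb))]

lemma pv_pyRange_pairwise (n : Nat) :
    List.Pairwise (· < ·) (PySem.List.pyRange 0 (n : Int) 1) := by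
  rw [PySem.List.pyRange_zero_natCast]
  exact List.pairwise_lt_range.map _ (fun a b h => by exact_mod_cast h)

lemma pv_children_eq (lines : List String) (W : Nat)
    (HW : ∀ s ∈ lines, s.toList.length = W) (x y : Int)
    (hx0 : 0 ≤ x) (hxW : x < (W : Int)) (hy0 : 0 ≤ y) (hyH : y < (lines.length : Int)) :
    childrenA lines (PySem.List.pyGetD lines y "").toList x y
        (PySem.List.pyGetD (PySem.List.pyGetD lines y "").toList x ' ')
      = cellB (hPassB (lines.map (fun l => l.toList.map getElevation))).2
              (hPassB (lines.map (fun l => l.toList.map getElevation))).1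
              (vPassB (lines.map (fun l => l.toList.map getElevation))).2
              (vPassB (lines.map (fun l => l.toList.map getElevation))).1 x y := by
  set elev := lines.map (fun l => l.toList.map getElevation) with helev
  have hH : elev.length = lines.length := by simp [helev]
  have hrowlen : ∀ (b : Int), 0 ≤ b → b < (lines.length : Int) →
      (PySem.List.pyGetD lines b "").toList.length = W := by
    intro b h0 h1
    rw [PySem.List.pyGetD_eq_getElem lines "" h0 h1]
    exact HW _ (List.getElem_mem _)
  have helevrow : ∀ (b : Int), 0 ≤ b → b < (lines.length : Int) →
      PySem.List.pyGetD elev b [] = (PySem.List.pyGetD lines b "").toList.map getElevation := by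
    intro b h0 h1
    rw [PySem.List.pyGetD_eq_getElem lines "" h0 h1,
        PySem.List.pyGetD_eq_getElem elev [] h0 (by rw [hH] at *; exact_mod_cast h1)]
    simp [helev]
  have hlenW : ∀ (b : Int), 0 ≤ b → b < (lines.length : Int) →
      ((PySem.List.pyGetD elev b []).length : Int) = (W : Int) := by
    intro b h0 h1
    rw [helevrow b h0 h1]
    simp [hrowlen b h0 h1]
  have helevAt : ∀ (b a : Int), 0 ≤ b → b < (lines.length : Int) → 0 ≤ a → a < (W : Int) →
      elevAtB elev b a = getElevation (charAtA lines b a) := by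
    intro b a hb0 hb1 ha0 ha1
    unfold elevAtB charAtA
    rw [helevrow b hb0 hb1]
    have hlen : a < (((PySem.List.pyGetD lines b "").toList.map getElevation).length : Int) := by
      simp [hrowlen b hb0 hb1]; exact_mod_cast ha1
    have hlen' : a < (((PySem.List.pyGetD lines b "").toList).length : Int) := by
      rw [hrowlen b hb0 hb1]; exact ha1
    rw [PySem.List.pyGetD_eq_getElem _ 0 ha0 hlen, PySem.List.pyGetD_eq_getElem _ ' ' ha0 hlen']
    simp
  -- the four membership characterisations, in A's terms
  have hmemL : (PySem.Set.contains (hPassB elev).2 (x, y) = true) ↔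
      (1 ≤ x ∧ getElevation (charAtA lines y (x - 1)) -
        getElevation (charAtA lines y x) ≤ 1) := by
    rw [PySem.Set.contains_iff, (pv_hPass_mem elev (x, y)).2,
        PySem.List.enumerate_eq_map_pyRange elev []]
    simp only [List.mem_map, PySem.List.len_eq, PySem.List.mem_pyRange_one]
    constructor
    · rintro ⟨yr, ⟨j, ⟨hj0, hjh⟩, rfl⟩, x0, hx0r, hcond, heq⟩
      dsimp only at hx0r hcond heq
      rw [hH] at hjh
      simp only [Prod.mk.injEq] at heq
      obtain ⟨hxx, hyy⟩ := heq
      subst hyy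
      have hx0v : x0 = x - 1 := by omega
      subst hx0v
      rw [hlenW y hj0 hjh] at hx0r
      refine ⟨by omega, ?_⟩
      have e1 := helevAt y (x - 1) hj0 hjh (by omega) (by omega)
      have e2 := helevAt y x hj0 hjh hx0 hxW
      unfold elevAtB at e1 e2
      rw [← e1, ← e2]
      have hxp : x - 1 + 1 = x := by omega
      rw [hxp] at hcond
      omega
    · rintro ⟨hx1, hcond⟩
      refine ⟨(y, PySem.List.pyGetD elev y []), ⟨y, ⟨hy0, by rw [hH]; omega⟩, rfl⟩,
        x - 1, ?_, ?_, ?_⟩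
      · dsimp only
        rw [hlenW y hy0 hyH]
        omega
      · dsimp only
        have e1 := helevAt y (x - 1) hy0 hyH (by omega) (by omega)
        have e2 := helevAt y x hy0 hyH hx0 hxW
        unfold elevAtB at e1 e2
        have hxp : x - 1 + 1 = x := by omega
        rw [hxp, e1, e2]
        omega
      · simp only [show x - 1 + 1 = x from by omega]
  have hmemR : (PySem.Set.contains (hPassB elev).1 (x, y) = true) ↔
      (x + 1 < (W : Int) ∧ getElevation (charAtA lines y (x + 1)) -
        getElevation (charAtA lines y x) ≤ 1) := by
    rw [PySem.Set.contains_iff, (pv_hPass_mem elev (x, y)).1,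
        PySem.List.enumerate_eq_map_pyRange elev []]
    simp only [List.mem_map, PySem.List.len_eq, PySem.List.mem_pyRange_one]
    constructor
    · rintro ⟨yr, ⟨j, ⟨hj0, hjh⟩, rfl⟩, x0, hx0r, hcond, heq⟩
      dsimp only at hx0r hcond heq
      rw [hH] at hjh
      simp only [Prod.mk.injEq] at heq
      obtain ⟨hxx, hyy⟩ := heq
      subst hyy
      subst hxx
      rw [hlenW y hj0 hjh] at hx0r
      refine ⟨by omega, ?_⟩
      have e1 := helevAt y (x + 1) hj0 hjh (by omega) (by omega)
      have e2 := helevAt y x hj0 hjh hx0 hxW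
      unfold elevAtB at e1 e2
      rw [← e1, ← e2]
      omega
    · rintro ⟨hx1, hcond⟩
      refine ⟨(y, PySem.List.pyGetD elev y []), ⟨y, ⟨hy0, by rw [hH]; omega⟩, rfl⟩,
        x, ?_, ?_, ?_⟩
      · dsimp only
        rw [hlenW y hy0 hyH]
        omega
      · dsimp only
        have e1 := helevAt y (x + 1) hy0 hyH (by omega) (by omega)
        have e2 := helevAt y x hy0 hyH hx0 hxW
        unfold elevAtB at e1 e2
        rw [e1, e2]
        omega
      · rfl
  have hmemU : (PySem.Set.contains (vPassB elev).2 (x, y) = true) ↔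
      (1 ≤ y ∧ getElevation (charAtA lines (y - 1) x) -
        getElevation (charAtA lines y x) ≤ 1) := by
    rw [PySem.Set.contains_iff, (pv_vPass_mem elev (x, y)).2]
    simp only [PySem.List.mem_pyRange_one]
    constructor
    · rintro ⟨y0, ⟨hy00, hy0h⟩, x0, hx0r, hcond, heq⟩
      rw [hH] at hy0h
      simp only [Prod.mk.injEq] at heq
      obtain ⟨hxx, hyy⟩ := heq
      subst hxx
      have hy0v : y0 = y - 1 := by omega
      subst hy0v
      have hyp : y - 1 + 1 = y := by omega
      rw [hyp] at hcond
      refine ⟨by omega, ?_⟩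
      have e1 := helevAt (y - 1) x (by omega) (by omega) hx0 hxW
      have e2 := helevAt y x hy0 hyH hx0 hxW
      rw [← e1, ← e2]
      omega
    · rintro ⟨hy1, hcond⟩
      refine ⟨y - 1, ⟨by omega, by rw [hH]; omega⟩, x, ?_, ?_, ?_⟩
      · have hyp : y - 1 + 1 = y := by omega
        rw [hyp, hlenW (y - 1) (by omega) (by omega), hlenW y hy0 hyH]
        omega
      · have hyp : y - 1 + 1 = y := by omega
        rw [hyp]
        have e1 := helevAt (y - 1) x (by omega) (by omega) hx0 hxW
        have e2 := helevAt y x hy0 hyH hx0 hxW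
        rw [e1, e2]
        omega
      · simp only [show y - 1 + 1 = y from by omega]
  have hmemD : (PySem.Set.contains (vPassB elev).1 (x, y) = true) ↔
      (y + 1 < (lines.length : Int) ∧ getElevation (charAtA lines (y + 1) x) -
        getElevation (charAtA lines y x) ≤ 1) := by
    rw [PySem.Set.contains_iff, (pv_vPass_mem elev (x, y)).1]
    simp only [PySem.List.mem_pyRange_one]
    constructor
    · rintro ⟨y0, ⟨hy00, hy0h⟩, x0, hx0r, hcond, heq⟩
      rw [hH] at hy0h
      simp only [Prod.mk.injEq] at heq
      obtain ⟨hxx, hyy⟩ := heq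
      subst hxx
      subst hyy
      refine ⟨by omega, ?_⟩
      have e1 := helevAt (y + 1) x (by omega) (by omega) hx0 hxW
      have e2 := helevAt y x hy0 hyH hx0 hxW
      rw [← e1, ← e2]
      omega
    · rintro ⟨hy1, hcond⟩
      refine ⟨y, ⟨hy0, by rw [hH]; omega⟩, x, ?_, ?_, ?_⟩
      · rw [hlenW (y + 1) (by omega) (by omega), hlenW y hy0 hyH]
        omega
      · have e1 := helevAt (y + 1) x (by omega) (by omega) hx0 hxW
        have e2 := helevAt y x hy0 hyH hx0 hxW
        rw [e1, e2]
        omega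
      · rfl
  -- reduce A's per-cell loop to four guarded singletons, B's chain likewise, compare guards
  simp only [childrenA, List.foldl_map, List.foldl_filter, dirsA,
    List.foldl_cons, List.foldl_nil]
  have hxm1 : x + -1 = x - 1 := by ring
  have hym1 : y + -1 = y - 1 := by ring
  simp only [hxm1, hym1, add_zero, pv_if_if]
  simp only [cellB]
  rw [hrowlen y hy0 hyH]
  rw [pv_peel, pv_peel]
  refine congrArg₂ (· ++ ·) (congrArg₂ (· ++ ·) (congrArg₂ (· ++ ·)
    (if_congr ?_ rfl rfl) (if_congr ?_ rfl rfl)) (if_congr ?_ rfl rfl)) (if_congr ?_ rfl rfl)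
  · -- L
    rw [hmemL]
    simp only [decide_eq_true_iff]
    constructor
    · rintro ⟨⟨h1, h2, h3, h4⟩, he⟩
      exact ⟨by omega, he⟩
    · rintro ⟨h5, he⟩
      exact ⟨⟨by omega, by omega, by omega, by omega⟩, he⟩
  · -- R
    rw [hmemR]
    simp only [decide_eq_true_iff]
    constructor
    · rintro ⟨⟨h1, h2, h3, h4⟩, he⟩
      exact ⟨h2, he⟩
    · rintro ⟨h5, he⟩
      exact ⟨⟨by omega, by omega, by omega, by omega⟩, he⟩
  · -- U
    rw [hmemU]
    simp only [decide_eq_true_iff]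
    constructor
    · rintro ⟨⟨h1, h2, h3, h4⟩, he⟩
      exact ⟨by omega, he⟩
    · rintro ⟨h5, he⟩
      exact ⟨⟨by omega, by omega, by omega, by omega⟩, he⟩
  · -- D
    rw [hmemD]
    simp only [decide_eq_true_iff]
    constructor
    · rintro ⟨⟨h1, h2, h3, h4⟩, he⟩
      exact ⟨h4, he⟩
    · rintro ⟨h5, he⟩
      exact ⟨⟨by omega, by omega, by omega, by omega⟩, he⟩

theorem pv_main (lines : List String) (h : Pre_construct_graph lines) :
    construct_graph lines = construct_graph_alt lines := by
  unfold Pre_construct_graph at h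
  have HW : ∀ s ∈ lines, s.toList.length = lines.headI.toList.length := by
    have h' : List.Pairwise (fun a b => a.toList.length = b.toList.length) lines :=
      @List.isChain_iff_pairwise _ _ _ ⟨fun h1 h2 => h1.trans h2⟩ |>.mp h
    intro s hs
    cases lines with
    | nil => simp at hs
    | cons a t =>
      rcases List.mem_cons.mp hs with rfl | hmem
      · simp
      · simpa using ((List.pairwise_cons.mp h').1 s hmem).symm
  set W := lines.headI.toList.length with hWdef
  set elev := lines.map (fun l => l.toList.map getElevation) with helev
  have hH : elev.length = lines.length := by simp [helev]
  have hrowlen : ∀ (b : Int), 0 ≤ b → b < (lines.length : Int) →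
      (PySem.List.pyGetD lines b "").toList.length = W := by
    intro b h0 h1
    rw [PySem.List.pyGetD_eq_getElem lines "" h0 h1]
    exact HW _ (List.getElem_mem _)
  have helevrow : ∀ (b : Int), 0 ≤ b → b < (lines.length : Int) →
      PySem.List.pyGetD elev b [] = (PySem.List.pyGetD lines b "").toList.map getElevation := by
    intro b h0 h1
    rw [PySem.List.pyGetD_eq_getElem lines "" h0 h1,
        PySem.List.pyGetD_eq_getElem elev [] h0 (by rw [hH] at *; exact_mod_cast h1)]
    simp [helev]
  simp only [construct_graph, construct_graph_alt]
  rw [← helev]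
  have stepA : ∀ (g : PySem.Dict (Int × Int) (PySem.Set (Int × Int))) (yl : Int × String),
      List.foldl (fun g xc =>
        g.insert (xc.1, yl.1) (childrenA lines yl.2.toList xc.1 yl.1 xc.2)) g
        (PySem.List.enumerate yl.2.toList)
      = List.foldl (fun g p => g.insert p.1 p.2) g
          ((PySem.List.enumerate yl.2.toList).map
            (fun xc => ((xc.1, yl.1), childrenA lines yl.2.toList xc.1 yl.1 xc.2))) := by
    intro g yl; rw [List.foldl_map]
  have stepB : ∀ (g : PySem.Dict (Int × Int) (PySem.Set (Int × Int))) (y : Int),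
      List.foldl (fun g x =>
        g.insert (x, y) (cellB (hPassB elev).2 (hPassB elev).1 (vPassB elev).2
          (vPassB elev).1 x y)) g
        (PySem.List.pyRange 0 ((PySem.List.pyGetD elev y []).length : Int) 1)
      = List.foldl (fun g p => g.insert p.1 p.2) g
          ((PySem.List.pyRange 0 ((PySem.List.pyGetD elev y []).length : Int) 1).map
            (fun x => ((x, y), cellB (hPassB elev).2 (hPassB elev).1 (vPassB elev).2
              (vPassB elev).1 x y))) := by
    intro g y; rw [List.foldl_map]
  simp only [stepA, stepB]
  rw [← pv_foldl_flatMap, ← pv_foldl_flatMap]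
  have hkA : (((PySem.List.enumerate lines).flatMap (fun yl =>
      (PySem.List.enumerate yl.2.toList).map
        (fun xc => ((xc.1, yl.1), childrenA lines yl.2.toList xc.1 yl.1 xc.2)))).map
          Prod.fst).Nodup := by
    rw [List.map_flatMap]
    simp only [List.map_map]
    rw [List.nodup_flatMap]
    constructor
    · intro yl _
      apply List.Pairwise.map _ ?_ (PySem.List.pairwise_lt_enumerate yl.2.toList 0)
      intro a b hab
      simp only [Function.comp]
      intro hc
      simp only [Prod.mk.injEq] at hc
      omega
    · apply (PySem.List.pairwise_lt_enumerate lines 0).imp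
      intro a b hab p hpa hpb
      simp only [Function.comp, List.mem_map] at hpa hpb
      obtain ⟨u, _, rfl⟩ := hpa
      obtain ⟨v, _, hv⟩ := hpb
      simp only [Prod.mk.injEq] at hv
      omega
  have hkB : (((PySem.List.pyRange 0 ((elev.length : Nat) : Int) 1).flatMap (fun y =>
      (PySem.List.pyRange 0 ((PySem.List.pyGetD elev y []).length : Int) 1).map (fun x =>
        ((x, y), cellB (hPassB elev).2 (hPassB elev).1 (vPassB elev).2
          (vPassB elev).1 x y)))).map Prod.fst).Nodup := by
    rw [List.map_flatMap]
    simp only [List.map_map]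
    rw [List.nodup_flatMap]
    constructor
    · intro y _
      apply List.Pairwise.map _ ?_ (pv_pyRange_pairwise (PySem.List.pyGetD elev y []).length)
      intro a b hab
      simp only [Function.comp]
      intro hc
      simp only [Prod.mk.injEq] at hc
      omega
    · apply (pv_pyRange_pairwise elev.length).imp
      intro a b hab p hpa hpb
      simp only [Function.comp, List.mem_map] at hpa hpb
      obtain ⟨u, _, rfl⟩ := hpa
      obtain ⟨v, _, hv⟩ := hpb
      simp only [Prod.mk.injEq] at hv
      omega
  rw [PySem.Dict.items_foldl_insert_fresh _ Prod.fst Prod.snd _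
        (fun a _ => PySem.Dict.contains_empty _) hkA,
      PySem.Dict.items_foldl_insert_fresh _ Prod.fst Prod.snd _
        (fun a _ => PySem.Dict.contains_empty _) hkB]
  suffices hpp : ((PySem.List.enumerate lines).flatMap (fun yl =>
      (PySem.List.enumerate yl.2.toList).map
        (fun xc => ((xc.1, yl.1), childrenA lines yl.2.toList xc.1 yl.1 xc.2))))
      = ((PySem.List.pyRange 0 ((elev.length : Nat) : Int) 1).flatMap (fun y =>
          (PySem.List.pyRange 0 ((PySem.List.pyGetD elev y []).length : Int) 1).map (fun x =>
            ((x, y), cellB (hPassB elev).2 (hPassB elev).1 (vPassB elev).2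
              (vPassB elev).1 x y)))) by rw [hpp]
  rw [PySem.List.enumerate_eq_map_pyRange lines "", List.flatMap_map]
  simp only [PySem.List.len_eq, hH]
  apply pv_flatMap_congr
  intro y hy
  rcases PySem.List.mem_pyRange_one.mp hy with ⟨hy0, hyH⟩
  rw [PySem.List.enumerate_eq_map_pyRange _ ' ', List.map_map]
  have hlen1 : PySem.List.len (PySem.List.pyGetD lines y "").toList = ((W : Nat) : Int) := by
    rw [PySem.List.len_eq, hrowlen y hy0 hyH]
  have hlen2 : (((PySem.List.pyGetD elev y []).length : Nat) : Int) = ((W : Nat) : Int) := by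
    rw [helevrow y hy0 hyH]
    simp [hrowlen y hy0 hyH]
  rw [hlen1, hlen2]
  apply List.map_congr_left
  intro x hx
  rcases PySem.List.mem_pyRange_one.mp hx with ⟨hx0, hxW⟩
  show ((x, y), childrenA lines (PySem.List.pyGetD lines y "").toList x y
      (PySem.List.pyGetD (PySem.List.pyGetD lines y "").toList x ' '))
    = ((x, y), cellB (hPassB elev).2 (hPassB elev).1 (vPassB elev).2 (vPassB elev).1 x y)
  have hc := pv_children_eq lines W HW x y hx0 hxW hy0 hyH
  rw [← helev] at hc
  exact congrArg (Prod.mk (x, y)) hc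

-- ===== VERDICT (by name: the statement is the Claim_ definition above) =====
theorem construct_graph_spec : Claim_equal_construct_graph := by
  intro lines _ hPre
  unfold Spec_construct_graph
  exact pv_main lines hPre
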